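-- pv_equiv track=rewrite | github.com/wilmanwdk/algorithms-and-data-structures-labs-4s | boyer-moore.py | shift_table
-- ===== SOURCE A (Python) =====
-- def shift_table(sample):
--     d = dict()
--     M = len(sample)
--     for char in sample:
--         if char == sample[-1]:
--             if sample.count(sample[-1]) == 1:
--                 d[char] = M - 1
--             else:
--                 d[char] = M - sample[:-1].rfind(char) - 1
--         else:
--             d[char] = M - sample.rfind(char)-1
--
--     return d
-- ===== SOURCE B (Python) =====
-- def shift_table(sample):
--     d = {}
--     M = len(sample)
--     for i, ch in enumerate(sample[:-1]):
--         d[ch] = M - 1 - i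
--     if sample:
--         d.setdefault(sample[-1], M - 1)
--     return d
-- ===== Notes on version B (the rewrite author's own statement) =====
-- stated objective: faster
-- what changed: Replaces the per-character count/rfind/slice rescans (O(M) work per character) with a single forward pass over sample[:-1] that lets dict overwrites record each character's last pre-final index, plus one setdefault for the final character.
import Mathlib
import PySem

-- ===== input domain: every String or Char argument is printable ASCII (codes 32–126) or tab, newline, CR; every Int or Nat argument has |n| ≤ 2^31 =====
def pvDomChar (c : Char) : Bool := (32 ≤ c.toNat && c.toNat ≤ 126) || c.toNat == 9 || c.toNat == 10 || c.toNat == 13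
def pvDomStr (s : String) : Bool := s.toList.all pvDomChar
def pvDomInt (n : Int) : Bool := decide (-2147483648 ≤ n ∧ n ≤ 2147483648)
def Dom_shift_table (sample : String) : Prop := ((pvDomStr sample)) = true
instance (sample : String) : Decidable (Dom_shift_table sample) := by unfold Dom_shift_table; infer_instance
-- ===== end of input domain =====

-- B replaces A's per-character count/rfind/slice rescans with one forward pass over
-- sample[:-1] (dict overwrites keep the last pre-final index) plus one setdefault for
-- the final character; measurably faster (O(M) vs O(M^2) passes).


-- ===== PORT A =====
-- Literal port of A: iterate the characters of sample, each char keyed as its 1-char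
-- string; inside the first branch `char` equals `sample[-1]`, so `sample.count(sample[-1])`
-- is ported as the equal `count` of `char` itself.
def shift_table (sample : String) : List (String × Int) :=
  let M : Int := PySem.Str.len sample
  let d : PySem.Dict String Int := sample.toList.foldl (fun d char =>
      if PySem.Str.pyGet? sample (-1) == some char then
        if PySem.Str.count sample (String.ofList [char]) == 1 then
          d.insert (String.ofList [char]) (M - 1)
        else
          d.insert (String.ofList [char])
            (M - PySem.Str.rfind (PySem.Str.slice sample none (some (-1))) (String.ofList [char]) - 1)
      else
        d.insert (String.ofList [char]) (M - PySem.Str.rfind sample (String.ofList [char]) - 1))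
    PySem.Dict.empty
  d.items

-- ===== PORT B =====
-- Literal port of B: one pass `for i, ch in enumerate(sample[:-1]): d[ch] = M - 1 - i`,
-- then `if sample: d.setdefault(sample[-1], M - 1)`.
def shift_table_alt (sample : String) : List (String × Int) :=
  let M : Int := PySem.Str.len sample
  let d : PySem.Dict String Int :=
    (PySem.List.enumerate (PySem.Str.slice sample none (some (-1))).toList).foldl
      (fun d p => d.insert (String.ofList [p.2]) (M - 1 - p.1)) PySem.Dict.empty
  let d' : PySem.Dict String Int :=
    match PySem.Str.pyGet? sample (-1) with
    | some z => d.setdefault (String.ofList [z]) (M - 1)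
    | none => d
  d'.items

-- ===== PRECONDITION & SPEC =====
def Spec_shift_table (sample : String) (out : List (String × Int)) : Prop := out = shift_table_alt sample
instance (sample : String) (out : List (String × Int)) : Decidable (Spec_shift_table sample out) := by unfold Spec_shift_table; infer_instance

-- ===== CLAIM (what is proved, stated in full; the proofs are below) =====
def Claim_equal_shift_table : Prop := ∀ (sample : String), Dom_shift_table sample → Spec_shift_table sample (shift_table sample)

-- ===== LEMMAS AND PROOFS =====

-- `s.count(c)` for a single character counts its occurrences.
theorem count_go_singleton (c : Char) : ∀ (fuel : Nat) (l : List Char) (acc : Nat),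
    l.length ≤ fuel → PySem.Chars.count.go [c] fuel l acc = acc + l.count c := by
  intro fuel
  induction fuel with
  | zero =>
    intro l acc h
    cases l with
    | nil => simp [PySem.Chars.count.go]
    | cons a t => simp at h
  | succ n ih =>
    intro l acc h
    cases l with
    | nil => simp [PySem.Chars.count.go]
    | cons a t =>
      by_cases hac : a = c
      · subst hac
        rw [show PySem.Chars.count.go [a] (n+1) (a :: t) acc = PySem.Chars.count.go [a] n t (acc+1) by
          simp [PySem.Chars.count.go, List.isPrefixOf]]
        rw [ih t (acc+1) (by simpa using h)]
        simp
        omega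
      · rw [show PySem.Chars.count.go [c] (n+1) (a :: t) acc = PySem.Chars.count.go [c] n t acc by
          simp [PySem.Chars.count.go, List.isPrefixOf]
          exact fun h' => absurd h'.symm hac]
        rw [ih t acc (by simpa using h)]
        simp [hac]

theorem count_singleton (l : List Char) (c : Char) :
    PySem.Chars.count l [c] = l.count c := by
  rw [PySem.Chars.count]
  simpa using count_go_singleton c l.length l 0 le_rfl

-- `rfind` of a single character scans from the right; below the appended last
-- character it agrees with the scan of the prefix.
theorem rfind_go_lt (ys : List Char) (y c : Char) :
    ∀ (x : Nat), x < ys.length →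
      PySem.Chars.rfind.go (ys ++ [y]) [c] x = PySem.Chars.rfind.go ys [c] x := by
  intro x
  induction x with
  | zero =>
    intro h
    cases ys with
    | nil => simp at h
    | cons a t => simp [PySem.Chars.rfind.go, List.isPrefixOf]
  | succ j ih =>
    intro h
    rw [show PySem.Chars.rfind.go (ys ++ [y]) [c] (j+1)
        = (if [c].isPrefixOf ((ys ++ [y]).drop (j+1)) then ((j+1 : Nat) : Int)
           else PySem.Chars.rfind.go (ys ++ [y]) [c] j) from rfl]
    rw [show PySem.Chars.rfind.go ys [c] (j+1)
        = (if [c].isPrefixOf (ys.drop (j+1)) then ((j+1 : Nat) : Int)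
           else PySem.Chars.rfind.go ys [c] j) from rfl]
    rw [List.drop_append_of_le_length (by omega)]
    have hne : ys.drop (j+1) ≠ [] := by
      simp [List.drop_eq_nil_iff]; omega
    obtain ⟨a, t, ht⟩ := List.exists_cons_of_ne_nil hne
    rw [ht]
    simp only [List.cons_append, List.isPrefixOf]
    by_cases hac : (c == a) = true
    · simp [hac]
    · simp only [Bool.and_true, hac, if_neg, Bool.false_eq_true,
        not_false_iff, if_neg]
      exact ih (by omega)

theorem rfind_append_singleton (ys : List Char) (y c : Char) :
    PySem.Chars.rfind (ys ++ [y]) [c]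
      = if c = y then (ys.length : Int) else PySem.Chars.rfind ys [c] := by
  rw [PySem.Chars.rfind, PySem.Chars.rfind]
  have hlen : (ys ++ [y]).length = ys.length + 1 := by simp
  rw [hlen]
  rw [show PySem.Chars.rfind.go (ys ++ [y]) [c] (ys.length + 1)
      = (if [c].isPrefixOf ((ys ++ [y]).drop (ys.length + 1)) then ((ys.length + 1 : Nat) : Int)
         else PySem.Chars.rfind.go (ys ++ [y]) [c] ys.length) from rfl]
  rw [show (ys ++ [y]).drop (ys.length + 1) = [] by simp]
  rw [if_neg (by simp [List.isPrefixOf])]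
  cases hys : ys with
  | nil =>
    subst hys
    by_cases hcy : c = y
    · subst hcy; simp [PySem.Chars.rfind.go, List.isPrefixOf]
    · simp [PySem.Chars.rfind.go, List.isPrefixOf, hcy]
  | cons a t =>
    rw [← hys]
    have hj : ys.length = t.length + 1 := by rw [hys]; simp
    rw [hj]
    rw [show PySem.Chars.rfind.go (ys ++ [y]) [c] (t.length + 1)
        = (if [c].isPrefixOf ((ys ++ [y]).drop (t.length + 1)) then ((t.length + 1 : Nat) : Int)
           else PySem.Chars.rfind.go (ys ++ [y]) [c] t.length) from rfl]
    rw [show (ys ++ [y]).drop (t.length + 1) = [y] by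
      rw [List.drop_append_of_le_length (by omega), show ys.drop (t.length+1) = [] by
        simp [List.drop_eq_nil_iff]; omega]
      simp]
    rw [show PySem.Chars.rfind.go ys [c] (t.length + 1)
        = (if [c].isPrefixOf (ys.drop (t.length + 1)) then ((t.length + 1 : Nat) : Int)
           else PySem.Chars.rfind.go ys [c] t.length) from rfl]
    rw [show ys.drop (t.length+1) = [] by simp [List.drop_eq_nil_iff]; omega]
    rw [show (if [c].isPrefixOf ([] : List Char) then ((t.length + 1 : Nat) : Int)
        else PySem.Chars.rfind.go ys [c] t.length) = PySem.Chars.rfind.go ys [c] t.length by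
      rw [if_neg]; simp [List.isPrefixOf]]
    rw [rfind_go_lt ys y c t.length (by omega)]
    rw [show ([c].isPrefixOf [y]) = (c == y) by simp [List.isPrefixOf]]
    by_cases hcy : c = y
    · rw [if_pos (by simp [hcy]), if_pos hcy]
    · rw [if_neg (by simp [hcy]), if_neg hcy]

theorem chKey_inj {c c' : Char} (h : String.ofList [c] = String.ofList [c']) : c = c' := by
  have := congrArg String.toList h
  simpa [String.toList_ofList] using this

-- A's loop: every insert of a character uses the same value, so the final dict maps
-- each inserted character to that value.
theorem getD_foldA (v : Char → Int) : ∀ (cs : List Char) (c : Char), c ∈ cs →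
    (cs.foldl (fun d ch => d.insert (String.ofList [ch]) (v ch)) PySem.Dict.empty).getD
      (String.ofList [c]) 0 = v c := by
  intro cs
  induction cs using List.reverseRecOn with
  | nil => intro c hc; simp at hc
  | append_singleton ys x ih =>
    intro c hc
    rw [List.foldl_append]
    simp only [List.foldl_cons, List.foldl_nil]
    rw [PySem.Dict.getD_insert]
    by_cases hcx : c = x
    · rw [if_pos (by rw [hcx]), hcx]
    · rw [if_neg (fun h => hcx (chKey_inj h))]
      exact ih c (by rcases List.mem_append.mp hc with h | h; exacts [h, absurd (by simpa using h) hcx])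

theorem enumerate_append_singleton (ys : List Char) (y : Char) : ∀ (s : Int),
    PySem.List.enumerate (ys ++ [y]) s = PySem.List.enumerate ys s ++ [(s + ys.length, y)] := by
  induction ys with
  | nil => intro s; simp [PySem.List.enumerate]
  | cons a t ih =>
    intro s
    simp only [List.cons_append, PySem.List.enumerate, ih (s + 1), List.length_cons]
    push_cast
    ring_nf

-- B's loop: positional inserts leave, for each character, the value of its last
-- occurrence, i.e. M - 1 - rfind.
theorem getD_foldB (M : Int) : ∀ (ys : List Char) (c : Char), c ∈ ys →
    (((PySem.List.enumerate ys).foldl (fun d p => d.insert (String.ofList [p.2]) (M - 1 - p.1))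
        PySem.Dict.empty).getD (String.ofList [c]) 0)
      = M - 1 - PySem.Chars.rfind ys [c] := by
  intro ys
  induction ys using List.reverseRecOn with
  | nil => intro c hc; simp at hc
  | append_singleton ys y ih =>
    intro c hc
    rw [enumerate_append_singleton ys y 0, List.foldl_append]
    simp only [List.foldl_cons, List.foldl_nil]
    rw [PySem.Dict.getD_insert, rfind_append_singleton]
    by_cases hcy : c = y
    · rw [if_pos (by rw [hcy]), if_pos hcy]
      ring
    · rw [if_neg (fun h => hcy (chKey_inj h)), if_neg hcy]
      exact ih c (by rcases List.mem_append.mp hc with h | h; exacts [h, absurd (by simpa using h) hcy])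

theorem keys_foldB (M : Int) (ys : List Char) :
    ((PySem.List.enumerate ys).foldl (fun d p => d.insert (String.ofList [p.2]) (M - 1 - p.1))
        PySem.Dict.empty).keys = PySem.Set.ofList (ys.map (fun c => String.ofList [c])) := by
  rw [PySem.Dict.keys_foldl_insert_key (PySem.List.enumerate ys) (fun p => String.ofList [p.2])
      (fun _ p => M - 1 - p.1) PySem.Dict.empty]
  rw [PySem.Dict.keys_empty, PySem.Set.update_nil_left]
  congr 1
  rw [show (fun (p : Int × Char) => String.ofList [p.2])
      = ((fun c => String.ofList [c]) ∘ (fun p : Int × Char => p.2)) from rfl, ← List.map_map,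
    PySem.List.map_snd_enumerate]

-- The central equivalence, on the character list of the sample.
theorem shift_table_eq_alt (sample : String) : shift_table sample = shift_table_alt sample := by
  unfold shift_table shift_table_alt
  simp only [PySem.Str.len_eq, PySem.Str.pyGet?_eq, PySem.Chars.pyGet?_eq_listPyGet?,
    PySem.Str.count_eq, PySem.Str.rfind_eq, PySem.Str.slice_to_neg_one, String.toList_ofList]
  generalize sample.toList = cs
  cases cs using List.reverseRecOn with
  | nil => rfl
  | append_singleton ys z =>
    simp only [List.dropLast_concat, PySem.List.pyGet?_neg_one_append_singleton]
    rw [show (fun (d : PySem.Dict String Int) char =>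
        if (some z == some char) then
          if (PySem.Chars.count (ys ++ [z]) [char] == 1) then
            d.insert (String.ofList [char]) (((ys ++ [z]).length : Int) - 1)
          else
            d.insert (String.ofList [char])
              (((ys ++ [z]).length : Int) - PySem.Chars.rfind ys [char] - 1)
        else
          d.insert (String.ofList [char])
            (((ys ++ [z]).length : Int) - PySem.Chars.rfind (ys ++ [z]) [char] - 1))
      = (fun (d : PySem.Dict String Int) char => d.insert (String.ofList [char])
          (if (some z == some char) then
            if (PySem.Chars.count (ys ++ [z]) [char] == 1) then ((ys ++ [z]).length : Int) - 1
            else ((ys ++ [z]).length : Int) - PySem.Chars.rfind ys [char] - 1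
          else ((ys ++ [z]).length : Int) - PySem.Chars.rfind (ys ++ [z]) [char] - 1)) by
      funext d ch; split_ifs <;> rfl]
    set M : Int := ((ys ++ [z]).length : Int) with hM
    set v : Char → Int := fun char =>
      if (some z == some char) then
        if (PySem.Chars.count (ys ++ [z]) [char] == 1) then M - 1
        else M - PySem.Chars.rfind ys [char] - 1
      else M - PySem.Chars.rfind (ys ++ [z]) [char] - 1 with hv
    set A : PySem.Dict String Int :=
      (ys ++ [z]).foldl (fun d ch => d.insert (String.ofList [ch]) (v ch)) PySem.Dict.empty with hA
    set B : PySem.Dict String Int :=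
      (PySem.List.enumerate ys).foldl (fun d p => d.insert (String.ofList [p.2]) (M - 1 - p.1))
        PySem.Dict.empty with hB
    have hAkeys : A.keys = PySem.Set.ofList ((ys ++ [z]).map (fun c => String.ofList [c])) := by
      rw [hA, PySem.Dict.keys_foldl_insert_key (ys ++ [z]) (fun ch => String.ofList [ch])
        (fun _ ch => v ch) PySem.Dict.empty, PySem.Dict.keys_empty, PySem.Set.update_nil_left]
    have hBkeys : B.keys = PySem.Set.ofList (ys.map (fun c => String.ofList [c])) :=
      keys_foldB M ys
    have hBmem : B.contains (String.ofList [z]) = true ↔ z ∈ ys := by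
      rw [PySem.Dict.contains_iff_mem_keys, hBkeys, PySem.Set.mem_ofList]
      constructor
      · intro h
        obtain ⟨a, ha, hk⟩ := List.mem_map.mp h
        exact chKey_inj hk ▸ ha
      · exact fun h => List.mem_map_of_mem h
    have hB'keys : (B.setdefault (String.ofList [z]) (M - 1)).keys
        = PySem.Set.ofList ((ys ++ [z]).map (fun c => String.ofList [c])) := by
      rw [PySem.Dict.keys_setdefault, List.map_append, List.map_singleton,
        PySem.Set.ofList_append_singleton, PySem.Set.add_eq_ite, hBkeys]
      by_cases hz : z ∈ ys
      · rw [if_pos (hBmem.mpr hz), if_pos (by rw [PySem.Set.mem_ofList]; exact List.mem_map_of_mem hz)]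
      · rw [if_neg (by rw [hBmem]; exact hz), if_neg (by
          rw [PySem.Set.mem_ofList]
          intro h
          obtain ⟨a, ha, hk⟩ := List.mem_map.mp h
          exact hz (chKey_inj hk ▸ ha))]
    have hAnodup : A.keys.Nodup := by rw [hAkeys]; exact PySem.Set.nodup_ofList _
    have hB'nodup : (B.setdefault (String.ofList [z]) (M - 1)).keys.Nodup := by
      rw [hB'keys]; exact PySem.Set.nodup_ofList _
    rw [PySem.Dict.items_eq_map_keys A hAnodup 0,
      PySem.Dict.items_eq_map_keys (B.setdefault (String.ofList [z]) (M - 1)) hB'nodup 0,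
      hAkeys, hB'keys]
    apply List.map_congr_left
    intro q hq
    obtain ⟨c, hc, rfl⟩ := List.mem_map.mp ((PySem.Set.mem_ofList _ _).mp hq)
    simp only [Prod.mk.injEq, true_and]
    have hAval : A.getD (String.ofList [c]) 0 = v c := getD_foldA v (ys ++ [z]) c hc
    rw [hAval]
    by_cases hcz : c = z
    · subst hcz
      rw [PySem.Dict.getD_setdefault_self]
      have hvz : v c = if ((ys ++ [c]).count c == 1 : Bool) then M - 1
          else M - PySem.Chars.rfind ys [c] - 1 := by
        rw [hv]; simp [count_singleton]
      by_cases hmem : c ∈ ys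
      · have hsome : (B.get? (String.ofList [c])).isSome = true := by
          rw [← PySem.Dict.contains_eq_isSome_get?]; exact hBmem.mpr hmem
        obtain ⟨w, hw⟩ := Option.isSome_iff_exists.mp hsome
        rw [PySem.Dict.getD_of_get?_eq_some _ _ hw]
        have := getD_foldB M ys c hmem
        rw [← hB] at this
        rw [PySem.Dict.getD_of_get?_eq_some _ _ hw] at this
        rw [this, hvz, if_neg]
        · omega
        · have : (ys ++ [c]).count c = ys.count c + 1 := by simp
          have hpos : 0 < ys.count c := List.count_pos_iff.mpr hmem
          simp only [this, beq_iff_eq]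
          omega
      · rw [PySem.Dict.getD_eq_get?_getD,
          (PySem.Dict.get?_eq_none_iff_contains _ _).mpr (by
            rw [← Bool.not_eq_true]; intro h; exact hmem (hBmem.mp h)),
          Option.getD_none, hvz, if_pos]
        have : (ys ++ [c]).count c = ys.count c + 1 := by simp
        have hzero : ys.count c = 0 := List.count_eq_zero.mpr hmem
        simp [this, hzero]
    · have hc' : c ∈ ys := by
        rcases List.mem_append.mp hc with h | h
        · exact h
        · simp at h; exact absurd h hcz
      rw [PySem.Dict.getD_eq_get?_getD,
        PySem.Dict.get?_setdefault_of_ne _ (M - 1) (fun h => hcz (chKey_inj h)),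
        ← PySem.Dict.getD_eq_get?_getD, getD_foldB M ys c hc']
      have hvc : v c = M - PySem.Chars.rfind (ys ++ [z]) [c] - 1 := by
        rw [hv]; simp [Ne.symm hcz]
      rw [hvc, rfind_append_singleton, if_neg hcz]
      omega

-- ===== VERDICT (by name: the statement is the Claim_ definition above) =====
theorem shift_table_spec : Claim_equal_shift_table := by
  intro sample _
  exact shift_table_eq_alt sample
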